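-- pv_equiv track=rewrite | github.com/isik-dev/aoc | 2023/day_11_cosmic_expansion.py | pairFinder
-- ===== SOURCE A (Python) =====
-- def pairFinder(n):
--     out = []
--     k = None
--     v = None
--     for r in n:
--         for c in r:
--             if c.isdigit():
--                 if k is None:
--                     k = c
--                 else:
--                     v = c
--             if k is not None and v is not None:
--                 out.append({ k:v })
--                 k = None
--                 v = None
--     return out
-- ===== SOURCE B (Python) =====
-- def _pairs(ds):
--     if len(ds) < 2:
--         return []
--     return [{ds[0]: ds[1]}] + _pairs(ds[2:])
--
--
-- def pairFinder(n):
--     digits = [c for row in n for c in row if c.isdigit()]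
--     return _pairs(digits)
-- ===== Notes on version B (the rewrite author's own statement) =====
-- stated objective: simpler
-- what changed: Replaced A's interleaved two-slot (k/v) state machine threaded through nested loops by a two-phase decomposition: gather all digit-strings of the grid in reading order into one list, then pair them up two at a time with a small recursive helper (dropping a final unpaired digit, as A does).
import Mathlib
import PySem

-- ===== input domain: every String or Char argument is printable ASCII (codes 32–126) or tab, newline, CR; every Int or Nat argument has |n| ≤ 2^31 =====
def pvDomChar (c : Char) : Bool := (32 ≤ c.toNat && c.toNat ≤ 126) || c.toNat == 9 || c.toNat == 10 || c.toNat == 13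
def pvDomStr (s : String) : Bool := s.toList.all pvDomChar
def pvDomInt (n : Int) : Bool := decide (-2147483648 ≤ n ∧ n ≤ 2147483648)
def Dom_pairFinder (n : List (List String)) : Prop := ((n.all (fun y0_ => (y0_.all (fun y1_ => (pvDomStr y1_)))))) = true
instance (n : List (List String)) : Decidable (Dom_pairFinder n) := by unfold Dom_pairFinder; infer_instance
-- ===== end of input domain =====

-- B gathers the grid's digit-strings into one list and pairs them two at a time,
-- replacing A's interleaved k/v state machine (objective: simpler).

-- ===== PORT A =====
-- state is (out, k, v) exactly as in A's loop body
def pairFinderStep (st : List (List (String × String)) × Option String × Option String)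
    (c : String) : List (List (String × String)) × Option String × Option String :=
  let (out, k, v) := st
  let (k, v) :=
    if PySem.Str.strIsdigit c then
      if k.isNone then (some c, v) else (k, some c)
    else (k, v)
  match k, v with
  | some kk, some vv => (out ++ [[(kk, vv)]], none, none)
  | k, v => (out, k, v)

def pairFinder (n : List (List String)) : List (List (String × String)) :=
  (n.foldl (fun st r => r.foldl pairFinderStep st) ([], none, none)).1

-- ===== PORT B =====
-- _pairs in Source B: pair up consecutive elements, dropping a final unpaired one
def pairsOf : List String → List (List (String × String))
  | a :: b :: rest => [(a, b)] :: pairsOf rest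
  | _ => []

def pairFinder_alt (n : List (List String)) : List (List (String × String)) :=
  let digits := (n.flatMap (fun row => row)).filter (fun c => PySem.Str.strIsdigit c)
  pairsOf digits

-- ===== PRECONDITION & SPEC =====
def Spec_pairFinder (n : List (List String)) (out : List (List (String × String))) : Prop := out = pairFinder_alt n
instance (n : List (List String)) (out : List (List (String × String))) : Decidable (Spec_pairFinder n out) := by unfold Spec_pairFinder; infer_instance

-- ===== CLAIM (what is proved, stated in full; the proofs are below) =====
def Claim_equal_pairFinder : Prop := ∀ (n : List (List String)), Dom_pairFinder n → Spec_pairFinder n (pairFinder n)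

-- ===== LEMMAS AND PROOFS =====

-- pairing with a pending first element k
def pairSt : Option String → List String → List (List (String × String))
  | none, l => pairsOf l
  | some _, [] => []
  | some k, b :: rest => [(k, b)] :: pairsOf rest

theorem pairsOf_cons (c : String) (l : List String) :
    pairsOf (c :: l) = pairSt (some c) l := by
  cases l with
  | nil => rfl
  | cons b rest => rfl

theorem foldl_step_eq (l : List String) (out : List (List (String × String)))
    (ko : Option String) :
    (l.foldl pairFinderStep (out, ko, none)).1
      = out ++ pairSt ko (l.filter (fun c => PySem.Str.strIsdigit c)) := by
  induction l generalizing out ko with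
  | nil =>
    cases ko <;> simp [pairSt, pairsOf]
  | cons c t ih =>
    by_cases hd : PySem.Chars.strIsdigit c.toList = true
    · cases ko with
      | none =>
        have hstep : pairFinderStep (out, none, none) c = (out, some c, none) := by
          simp [pairFinderStep, PySem.Str.strIsdigit, hd]
        simp only [List.foldl_cons, hstep, ih]
        simp [hd, pairSt, pairsOf_cons]
      | some k =>
        have hstep : pairFinderStep (out, some k, none) c
            = (out ++ [[(k, c)]], none, none) := by
          simp [pairFinderStep, PySem.Str.strIsdigit, hd]
        simp only [List.foldl_cons, hstep, ih]
        simp [hd, pairSt]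
    · have hstep : pairFinderStep (out, ko, none) c = (out, ko, none) := by
        cases ko <;> simp [pairFinderStep, PySem.Str.strIsdigit, hd]
      simp only [List.foldl_cons, hstep, ih]
      simp [hd]

-- ===== VERDICT (by name: the statement is the Claim_ definition above) =====
theorem pairFinder_spec : Claim_equal_pairFinder := by
  intro n _
  show pairFinder n = pairFinder_alt n
  unfold pairFinder pairFinder_alt
  rw [← List.foldl_flatten]
  rw [foldl_step_eq]
  simp [pairSt, List.flatMap_def]
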